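-- pv_equiv track=rewrite | github.com/YumaYazaki/MAPF_smoothing | MAPF/orientation_lacam_backend.py | _reconstruct_paths_from_config_sequence
-- ===== SOURCE A (Python) =====
-- from typing import Dict, FrozenSet, List, Optional, Sequence, Tuple
--
-- Config = Tuple[int, ...]
--
-- def _reconstruct_paths_from_config_sequence(
--
--     config_sequence: Sequence[Config],
-- ) -> Dict[int, List[int]]:
--     """Config sequence をロボット別状態列へ復元する。
--
--     Args:
--         config_sequence: Configuration 列。
--
--     Returns:
--         ロボットID -> 状態ID列。
--     """
--     if not config_sequence:
--         raise ValueError("config_sequence must not be empty")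
--
--     num_agents = len(config_sequence[0])
--     paths_by_agent: Dict[int, List[int]] = {
--         robot_id: [] for robot_id in range(num_agents)
--     }
--
--     for config in config_sequence:
--         if len(config) != num_agents:
--             raise ValueError("Inconsistent config size in config_sequence")
--         for robot_id in range(num_agents):
--             paths_by_agent[robot_id].append(config[robot_id])
--
--     return paths_by_agent
-- ===== SOURCE B (Python) =====
-- def _reconstruct_paths_from_config_sequence(config_sequence):
--     if not config_sequence:
--         raise ValueError("config_sequence must not be empty")
--     num_agents = len(config_sequence[0])
--     for config in config_sequence:
--         if len(config) != num_agents: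
--             raise ValueError("Inconsistent config size in config_sequence")
--     return {robot_id: list(col) for robot_id, col in enumerate(zip(*config_sequence))}
-- ===== Notes on version B (the rewrite author's own statement) =====
-- stated objective: alternative
-- what changed: B replaces A's time-major scan that appends into a running dict of partial paths by a dedicated validation pass followed by a matrix transpose (zip(*config_sequence)) enumerated into a dict, so each agent's whole path is produced at once and no mutable per-agent state is maintained.
import Mathlib
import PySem

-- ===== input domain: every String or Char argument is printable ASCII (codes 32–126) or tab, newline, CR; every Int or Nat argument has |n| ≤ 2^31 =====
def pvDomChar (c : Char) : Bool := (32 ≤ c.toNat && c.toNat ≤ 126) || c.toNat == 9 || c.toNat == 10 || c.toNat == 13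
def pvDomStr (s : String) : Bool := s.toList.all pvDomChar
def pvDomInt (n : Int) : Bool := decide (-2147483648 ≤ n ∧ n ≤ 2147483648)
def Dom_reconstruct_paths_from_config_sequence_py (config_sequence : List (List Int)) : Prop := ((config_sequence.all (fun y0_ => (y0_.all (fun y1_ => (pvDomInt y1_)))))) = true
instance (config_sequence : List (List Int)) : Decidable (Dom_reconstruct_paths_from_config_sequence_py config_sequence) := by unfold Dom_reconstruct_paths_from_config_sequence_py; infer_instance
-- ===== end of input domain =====

-- B replaces A's time-major scan over a running dict of partial paths by a validation pass followed
-- by a matrix transpose (zip(*)) enumerated into the result: an alternative decomposition, same cost.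


-- ===== PORT A =====
-- A: time-major scan appending config[rid] to a running dict of partial paths.
def reconstruct_paths_from_config_sequence_py (config_sequence : List (List Int)) : List (Int × List Int) :=
  match config_sequence with
  | [] => []   -- Python raises ValueError here; excluded by Pre_
  | c0 :: _ =>
    let n : Int := (c0.length : Int)
    let init : PySem.Dict Int (List Int) :=
      (PySem.List.pyRange 0 n 1).foldl (fun d rid => d.insert rid []) PySem.Dict.empty
    (config_sequence.foldl
      (fun d config =>
        if (config.length : Int) ≠ n then d   -- Python raises ValueError here; excluded by Pre_
        else (PySem.List.pyRange 0 n 1).foldl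
          (fun d rid => d.modify rid [] (· ++ [PySem.List.pyGetD config rid 0])) d)
      init).items

-- ===== PORT B =====
-- zip(*rows): hand-written, exact — Python's zip stops at the first exhausted row (min length).
def pyZipStar (rows : List (List Int)) : List (List Int) :=
  if h : rows = [] ∨ rows.any (·.isEmpty) then []
  else rows.map (fun r => r.headD 0) :: pyZipStar (rows.map List.tail)
termination_by (rows.map List.length).sum
decreasing_by
  rw [not_or] at h
  obtain ⟨hne, hany⟩ := h
  rw [Bool.not_eq_true, List.any_eq_false] at hany
  simp only [List.map_map]
  match rows, hne with
  | r :: rs, _ =>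
    have hr : r ≠ [] := by
      have := hany r (by simp); simpa [List.isEmpty_iff] using this
    have h1 : r.tail.length < r.length := by
      cases r with | nil => exact absurd rfl hr | cons a l => simp
    have h2 : (rs.map (List.length ∘ List.tail)).sum ≤ (rs.map List.length).sum := by
      apply List.sum_le_sum
      intro x _
      simp only [Function.comp_apply, List.length_tail]
      omega
    rw [show (List.length ∘ fun x : {x // x ∈ r :: rs} => (↑x : List Int).tail)
          = ((List.length ∘ List.tail) ∘ Subtype.val) from rfl,
        ← List.map_map, List.attach_map_subtype_val]
    simp only [List.map_cons, List.sum_cons, Function.comp_apply]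
    omega

-- B: validation pass, then enumerate the transpose.
def reconstruct_paths_from_config_sequence_py_alt (config_sequence : List (List Int)) : List (Int × List Int) :=
  match config_sequence with
  | [] => []   -- Python raises ValueError here; excluded by Pre_
  | c0 :: _ =>
    if ¬ (config_sequence.all (fun config => config.length = c0.length)) then []
      -- Python's validation pass raises ValueError here; excluded by Pre_
    else
      PySem.List.enumerate (pyZipStar config_sequence) 0

-- ===== PRECONDITION & SPEC =====
-- Pre_ excludes exactly the inputs on which A raises ValueError: the empty sequence and
-- sequences containing a config whose length differs from the first config's length.
def Pre_reconstruct_paths_from_config_sequence_py (config_sequence : List (List Int)) : Prop :=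
  config_sequence ≠ [] ∧
  ∀ c ∈ config_sequence, c.length = (config_sequence.headD []).length
instance (config_sequence : List (List Int)) : Decidable (Pre_reconstruct_paths_from_config_sequence_py config_sequence) := by unfold Pre_reconstruct_paths_from_config_sequence_py; infer_instance

def pvWitness_reconstruct_paths_from_config_sequence_py : List (List Int) := [[1, 2], [3, 4], [5, 6]]

def Spec_reconstruct_paths_from_config_sequence_py (config_sequence : List (List Int)) (out : List (Int × List Int)) : Prop := out = reconstruct_paths_from_config_sequence_py_alt config_sequence
instance (config_sequence : List (List Int)) (out : List (Int × List Int)) : Decidable (Spec_reconstruct_paths_from_config_sequence_py config_sequence out) := by unfold Spec_reconstruct_paths_from_config_sequence_py; infer_instance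

-- ===== CLAIM (what is proved, stated in full; the proofs are below) =====
def Claim_equal_reconstruct_paths_from_config_sequence_py : Prop := ∀ (config_sequence : List (List Int)), Dom_reconstruct_paths_from_config_sequence_py config_sequence → Pre_reconstruct_paths_from_config_sequence_py config_sequence → Spec_reconstruct_paths_from_config_sequence_py config_sequence (reconstruct_paths_from_config_sequence_py config_sequence)

-- ===== LEMMAS AND PROOFS =====

-- one pass of A's inner loop: modifying each of a list of DISTINCT keys once
theorem getD_foldl_modify_nodup (ks : List Int) (hnd : ks.Nodup)
    (g : Int → List Int → List Int) (d : PySem.Dict Int (List Int)) (k : Int) :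
    ((ks.foldl (fun d k => d.modify k [] (g k)) d).getD k []) =
      if k ∈ ks then g k (d.getD k []) else d.getD k [] := by
  induction ks generalizing d with
  | nil => simp
  | cons k0 rest ih =>
    simp only [List.foldl_cons]
    rw [ih hnd.of_cons]
    by_cases hk : k = k0
    · subst hk
      have : k ∉ rest := by simp at hnd; exact hnd.1
      simp [this, PySem.Dict.getD_modify_self]
    · by_cases hr : k ∈ rest <;>
        simp [hr, hk, PySem.Dict.getD_modify_of_ne d ([] : List Int) (g k0) hk]

theorem keys_foldl_modify_mem (ks : List Int)
    (g : Int → List Int → List Int) (d : PySem.Dict Int (List Int))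
    (hsub : ∀ k ∈ ks, k ∈ d.keys) :
    (ks.foldl (fun d k => d.modify k [] (g k)) d).keys = d.keys := by
  induction ks generalizing d with
  | nil => rfl
  | cons k0 rest ih =>
    simp only [List.foldl_cons]
    have hc : d.contains k0 = true := by
      rw [PySem.Dict.contains_iff_mem_keys]; exact hsub k0 (by simp)
    have hkeys : (d.modify k0 [] (g k0)).keys = d.keys := by
      rw [PySem.Dict.keys_modify, PySem.Dict.keys_insert_of_contains _ _ hc]
    rw [ih _ (by intro k hk; rw [hkeys]; exact hsub k (by simp [hk])), hkeys]

-- A's outer loop: folding the per-config pass over a dict keyed exactly by range n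
theorem outer_fold (n : Int) (cs : List (List Int)) (h : ∀ c ∈ cs, (c.length : Int) = n)
    (d : PySem.Dict Int (List Int)) (hk : d.keys = PySem.List.pyRange 0 n 1) :
    let F : PySem.Dict Int (List Int) → List Int → PySem.Dict Int (List Int) :=
      fun d config =>
        if (config.length : Int) ≠ n then d
        else (PySem.List.pyRange 0 n 1).foldl
          (fun d rid => d.modify rid [] (· ++ [PySem.List.pyGetD config rid 0])) d
    (cs.foldl F d).keys = PySem.List.pyRange 0 n 1 ∧
      ∀ k, (cs.foldl F d).getD k [] =
        if k ∈ PySem.List.pyRange 0 n 1 then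
          d.getD k [] ++ cs.map (fun c => PySem.List.pyGetD c k 0)
        else d.getD k [] := by
  intro F
  induction cs generalizing d with
  | nil => refine ⟨hk, fun k => ?_⟩; split <;> simp
  | cons c rest ih =>
    have hc : (c.length : Int) = n := h c (by simp)
    have hstep : F d c = (PySem.List.pyRange 0 n 1).foldl
        (fun d rid => d.modify rid [] (· ++ [PySem.List.pyGetD c rid 0])) d := by
      simp [F, hc]
    have hkeys' : (F d c).keys = PySem.List.pyRange 0 n 1 := by
      rw [hstep, keys_foldl_modify_mem _ _ _ (by rw [hk]; exact fun k hk => hk), hk]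
    obtain ⟨hK, hG⟩ := ih (fun c hc => h c (by simp [hc])) (F d c) hkeys'
    refine ⟨by simpa using hK, fun k => ?_⟩
    have hGk := hG k
    have hFd : (F d c).getD k [] =
        if k ∈ PySem.List.pyRange 0 n 1 then d.getD k [] ++ [PySem.List.pyGetD c k 0]
        else d.getD k [] := by
      rw [hstep, getD_foldl_modify_nodup _ (PySem.List.nodup_pyRange_one 0 n) _ d k]
    simp only [List.foldl_cons] at *
    rw [hGk, hFd]
    by_cases hm : k ∈ PySem.List.pyRange 0 n 1 <;> simp [hm]

theorem init_items (n : Int) :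
    ((PySem.List.pyRange 0 n 1).foldl (fun d rid => d.insert rid ([] : List Int))
        PySem.Dict.empty).items =
      (PySem.List.pyRange 0 n 1).map (fun k => (k, ([] : List Int))) := by
  have := PySem.Dict.items_foldl_insert_fresh (PySem.List.pyRange 0 n 1) (fun x => x)
    (fun _ => ([] : List Int)) PySem.Dict.empty (by simp)
    (by simpa using PySem.List.nodup_pyRange_one 0 n)
  simpa using this

-- the transpose: with equal-length nonempty input, pyZipStar is the list of columns
theorem pyZipStar_spec (m : Nat) (cs : List (List Int)) (hne : cs ≠ [])
    (hlen : ∀ c ∈ cs, c.length = m) :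
    pyZipStar cs = (List.range m).map (fun j => cs.map (fun c => c.getD j 0)) := by
  induction m generalizing cs with
  | zero =>
    rw [pyZipStar]
    rw [dif_pos ?_]
    · simp
    · right
      simp only [List.any_eq_true]
      match cs, hne with
      | c :: rest, _ =>
        exact ⟨c, by simp, by simp [List.isEmpty_iff, List.length_eq_zero_iff.mp (hlen c (by simp))]⟩
  | succ m ih =>
    rw [pyZipStar]
    rw [dif_neg ?_]
    · have htne : cs.map List.tail ≠ [] := by simpa using hne
      have htlen : ∀ c ∈ cs.map List.tail, c.length = m := by
        intro c hc
        simp only [List.mem_map] at hc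
        obtain ⟨y, hy, rfl⟩ := hc
        have := hlen y hy
        simp [List.length_tail, this]
      rw [ih (cs.map List.tail) htne htlen]
      rw [List.range_succ_eq_map]
      simp only [List.map_cons, List.map_map]
      congr 1
      · apply List.map_congr_left
        intro c _
        cases c <;> simp
      · apply List.map_congr_left
        intro j _
        apply List.map_congr_left
        intro c _
        cases c <;> simp
    · rw [not_or]
      refine ⟨hne, ?_⟩
      rw [Bool.not_eq_true, List.any_eq_false]
      intro c hc
      have := hlen c hc
      simp only [List.isEmpty_iff, decide_eq_true_eq]
      intro hcnil
      rw [hcnil] at this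
      simp at this

-- ===== VERDICT (by name: the statement is the Claim_ definition above) =====
theorem reconstruct_paths_from_config_sequence_py_spec : Claim_equal_reconstruct_paths_from_config_sequence_py := by
  intro cs _ hpre
  unfold Spec_reconstruct_paths_from_config_sequence_py
  obtain ⟨hne, hlen⟩ := hpre
  match cs, hne with
  | c0 :: rest, _ =>
    have hlen' : ∀ c ∈ c0 :: rest, (c.length : Int) = (c0.length : Int) := by
      intro c hc; have := hlen c hc; simp at this; omega
    have hlenN : ∀ c ∈ c0 :: rest, c.length = c0.length := by
      intro c hc; have := hlen c hc; simpa using this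
    unfold reconstruct_paths_from_config_sequence_py reconstruct_paths_from_config_sequence_py_alt
    simp only []
    rw [if_neg (by
      simp only [not_not, List.all_eq_true, decide_eq_true_eq]
      exact hlenN)]
    set n : Int := (c0.length : Int) with hn
    set init : PySem.Dict Int (List Int) :=
      (PySem.List.pyRange 0 n 1).foldl (fun d rid => d.insert rid []) PySem.Dict.empty with hinit
    have hkinit : init.keys = PySem.List.pyRange 0 n 1 := by
      show init.items.map (·.1) = _
      rw [hinit, init_items, List.map_map]
      have hid : ((fun x : Int × List Int => x.1) ∘ fun k : Int => (k, ([] : List Int))) = id := rfl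
      rw [hid, List.map_id]
    obtain ⟨hK, hG⟩ := outer_fold n (c0 :: rest) hlen' init hkinit
    have hndK : (List.foldl
        (fun d config =>
          if (config.length : Int) ≠ n then d
          else (PySem.List.pyRange 0 n 1).foldl
            (fun d rid => d.modify rid [] (· ++ [PySem.List.pyGetD config rid 0])) d)
        init (c0 :: rest)).keys.Nodup := by
      rw [hK]; exact PySem.List.nodup_pyRange_one 0 n
    rw [PySem.Dict.items_eq_map_keys _ hndK []]
    rw [hK]
    -- A's items = the canonical column map over pyRange
    have hA : (PySem.List.pyRange 0 n 1).map
          (fun k => (k, (List.foldl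
            (fun d config =>
              if (config.length : Int) ≠ n then d
              else (PySem.List.pyRange 0 n 1).foldl
                (fun d rid => d.modify rid [] (· ++ [PySem.List.pyGetD config rid 0])) d)
            init (c0 :: rest)).getD k [])) =
        (PySem.List.pyRange 0 n 1).map
          (fun k => (k, (c0 :: rest).map (fun c => PySem.List.pyGetD c k 0))) := by
      apply List.map_congr_left
      intro k hkmem
      have hGk := hG k
      rw [if_pos hkmem] at hGk
      rw [hGk]
      have hinitk : init.getD k [] = [] := by
        have hmem : (k, ([] : List Int)) ∈ init.items := by
          rw [hinit, init_items]; exact List.mem_map_of_mem hkmem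
        have hnd' : init.keys.Nodup := by
          rw [hkinit]; exact PySem.List.nodup_pyRange_one 0 n
        exact PySem.Dict.getD_of_mem_items init hmem hnd' []
      simp [hinitk]
    rw [hA]
    -- B's enumerate of the transpose = the same canonical map
    have hZ := pyZipStar_spec c0.length (c0 :: rest) (by simp) hlenN
    have hZlen : (pyZipStar (c0 :: rest)).length = c0.length := by
      rw [hZ]; simp
    rw [PySem.List.enumerate_eq_map_pyRange (pyZipStar (c0 :: rest)) ([] : List Int)]
    simp only [PySem.List.len_eq]
    rw [hZlen]
    apply List.map_congr_left
    intro k hkmem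
    have hk01 : 0 ≤ k ∧ k < n := (PySem.List.mem_pyRange_one).mp hkmem
    obtain ⟨hk0, hk1⟩ := hk01
    have hkt : k = ((k.toNat : Nat) : Int) := by omega
    have hklt : k.toNat < c0.length := by omega
    rw [hkt]
    simp only [PySem.List.pyGetD_natCast]
    rw [hZ]
    congr 1
    have hlen2 : k.toNat <
        (List.map (fun j => List.map (fun c => c.getD j 0) (c0 :: rest))
          (List.range c0.length)).length := by simpa using hklt
    rw [List.getD_eq_getElem _ _ hlen2]
    simp [hklt]
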